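-- pv_equiv track=rewrite | github.com/shamedgh/confine | python-utils/util.py | getOffsetFrom
-- ===== SOURCE A (Python) =====
-- def getOffsetFrom(targetCnt, sizeLayout):
--     '''
--     Compute relative addresses from corresponding layout
--     Example:
--         targetCnt  : [3, 1]                   # num of funcs in each obj
--         sizeLayout : [0x60, 0x40, 0x20, 0x20] # sizes of each func
--         offsetsFrom: [0x0, 0x60, 0xa0, 0xc0]  # returns func offsets from the objs
--     :param targetCnt:
--     :param sizeLayout:
--     :return:
--     '''
--
--     offsetsFrom = list()
--     assert sum(targetCnt) == len(sizeLayout), "Size does NOT match!"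
--
--     layoutIdx = 0
--     for tc in targetCnt:
--         for targetIdx in range(tc):
--             # The beginning offset from the layout
--             if targetIdx == 0:
--                 offsetsFrom.append(0x0)
--             # The offset has to be the sum of the previous object sizes
--             else:
--                 offsetsFrom.append(offsetsFrom[-1] + sizeLayout[layoutIdx - 1])
--             layoutIdx += 1
--
--     return offsetsFrom
-- ===== SOURCE B (Python) =====
-- def getOffsetFrom(targetCnt, sizeLayout):
--     '''
--     Compute relative addresses: global prefix sums of the whole layout, a
--     bases vector repeating each object's starting prefix value, then one
--     zip-subtraction pass.
--     '''
--     assert sum(targetCnt) == len(sizeLayout), "Size does NOT match!"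
--     # pass 1: global prefix sums of all function sizes
--     prefix = [0]
--     for s in sizeLayout:
--         prefix.append(prefix[-1] + s)
--     # pass 2: for each object, repeat its starting prefix value tc times
--     bases = []
--     start = 0
--     for tc in targetCnt:
--         bases.extend([prefix[start]] * tc)
--         start += tc
--     # pass 3: offset = global prefix sum minus the object's base
--     return [p - b for p, b in zip(prefix, bases)]
-- ===== Notes on version B (the rewrite author's own statement) =====
-- stated objective: alternative
-- what changed: Replaces A's single flat loop (running layout index, reading offsetsFrom[-1]) by three staged passes: a global prefix-sum array of the whole layout, a bases vector repeating each object's starting prefix value, and one zip-subtraction pass offset = prefix[i] - base[i].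
-- outside the precondition, e.g. on getOffsetFrom([2, -1, 1], [5, 6]): A returns [0, 5, 0], B returns [0, 5, 6]; on getOffsetFrom([3, -2, 1], [5, 6]): A returns [0, 5, 11, 0], B raises IndexError
import Mathlib
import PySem

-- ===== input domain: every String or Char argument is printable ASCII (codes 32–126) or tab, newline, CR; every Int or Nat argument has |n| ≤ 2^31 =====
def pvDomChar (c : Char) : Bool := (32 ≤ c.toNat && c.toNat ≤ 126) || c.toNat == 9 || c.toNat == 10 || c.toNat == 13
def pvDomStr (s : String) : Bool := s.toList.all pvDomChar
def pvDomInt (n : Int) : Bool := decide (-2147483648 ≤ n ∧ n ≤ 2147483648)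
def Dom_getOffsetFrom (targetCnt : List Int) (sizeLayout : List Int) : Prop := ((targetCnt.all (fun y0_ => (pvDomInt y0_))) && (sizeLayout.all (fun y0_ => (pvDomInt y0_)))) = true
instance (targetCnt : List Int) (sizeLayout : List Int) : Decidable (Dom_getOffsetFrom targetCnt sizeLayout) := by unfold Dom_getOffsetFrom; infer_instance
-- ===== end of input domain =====

-- B replaces A's flat loop (running layout index + offsetsFrom[-1]) by three staged
-- passes: global prefix sums, per-object repeated bases, and a zip-subtraction;
-- objective: alternative, same cost.


-- ===== PORT A =====
-- literal port: for tc in targetCnt: for targetIdx in range(tc): append 0 or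
-- offsetsFrom[-1] + sizeLayout[layoutIdx-1]; layoutIdx += 1.
-- Indexing uses pyGet? with .getD 0 only to stay total; inside Pre_ the option is always some.
def getOffsetFrom (targetCnt : List Int) (sizeLayout : List Int) : List Int :=
  (targetCnt.foldl
    (fun (st : List Int × Int) (tc : Int) =>
      (PySem.List.pyRange 0 tc 1).foldl
        (fun (st : List Int × Int) (targetIdx : Int) =>
          if targetIdx == 0 then
            (st.1 ++ [0], st.2 + 1)
          else
            (st.1 ++ [((PySem.List.pyGet? st.1 (-1)).getD 0)
                        + ((PySem.List.pyGet? sizeLayout (st.2 - 1)).getD 0)],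
             st.2 + 1))
        st)
    ([], 0)).1

-- ===== PORT B =====
-- literal port of Source B: pass 1 builds the global prefix-sum list (prefix[-1] + s),
-- pass 2 builds bases by extending with [prefix[start]] * tc per object
-- (Python's [x]*tc is empty for tc ≤ 0, as is List.replicate tc.toNat),
-- pass 3 maps subtraction over zip(prefix, bases).
-- prefix[start] uses pyGet? with .getD 0 only to stay total; inside Pre_ start is always in range.
def getOffsetFrom_alt (targetCnt : List Int) (sizeLayout : List Int) : List Int :=
  let prefixL := sizeLayout.foldl
    (fun (p : List Int) (s : Int) => p ++ [((PySem.List.pyGet? p (-1)).getD 0) + s]) [0]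
  let bases := (targetCnt.foldl
    (fun (st : List Int × Int) (tc : Int) =>
      (st.1 ++ List.replicate tc.toNat ((PySem.List.pyGet? prefixL st.2).getD 0), st.2 + tc))
    ([], 0)).1
  (prefixL.zip bases).map (fun pb => pb.1 - pb.2)

-- ===== PRECONDITION & SPEC =====
-- Pre_ excludes inputs where sum(targetCnt) ≠ len(sizeLayout) (A's assert raises there),
-- and lists containing a negative count: there A's range() silently skips the object while
-- its flat layout index still drifts (an accident of the flat-loop implementation), and
-- B's own prefix[start] lookup can even raise IndexError, so such inputs are excluded.
def Pre_getOffsetFrom (targetCnt : List Int) (sizeLayout : List Int) : Prop :=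
  targetCnt.sum = (sizeLayout.length : Int) ∧ ∀ tc ∈ targetCnt, 0 ≤ tc
instance (targetCnt : List Int) (sizeLayout : List Int) : Decidable (Pre_getOffsetFrom targetCnt sizeLayout) := by unfold Pre_getOffsetFrom; infer_instance

def pvWitness_getOffsetFrom : List Int × List Int := ([3, 1], [96, 64, 32, 32])

def Spec_getOffsetFrom (targetCnt : List Int) (sizeLayout : List Int) (out : List Int) : Prop := out = getOffsetFrom_alt targetCnt sizeLayout
instance (targetCnt : List Int) (sizeLayout : List Int) (out : List Int) : Decidable (Spec_getOffsetFrom targetCnt sizeLayout out) := by unfold Spec_getOffsetFrom; infer_instance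

-- ===== CLAIM (what is proved, stated in full; the proofs are below) =====
def Claim_equal_getOffsetFrom : Prop := ∀ (targetCnt : List Int) (sizeLayout : List Int), Dom_getOffsetFrom targetCnt sizeLayout → Pre_getOffsetFrom targetCnt sizeLayout → Spec_getOffsetFrom targetCnt sizeLayout (getOffsetFrom targetCnt sizeLayout)

-- ===== LEMMAS AND PROOFS =====

-- offsets emitted after the first one of an object: each is previous + sizeLayout[m-1]
def restA (sl : List Int) : Int → Nat → Int → List Int
  | _, 0, _ => []
  | m, c + 1, b =>
      (b + (PySem.List.pyGet? sl (m - 1)).getD 0)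
        :: restA sl (m + 1) c (b + (PySem.List.pyGet? sl (m - 1)).getD 0)

-- the offsets of one object of c functions starting at layout position m
def objOffs (sl : List Int) (m : Int) : Nat → List Int
  | 0 => []
  | c + 1 => 0 :: restA sl (m + 1) c 0

-- prefix sums (initial b) of a chunk, one output per element
def chunkOffs (b : Int) : List Int → List Int
  | [] => []
  | s :: rest => b :: chunkOffs (b + s) rest

-- all prefix sums of a list starting at b (one MORE than the list's length)
def prefixes (b : Int) : List Int → List Int
  | [] => [b]
  | s :: rest => b :: prefixes (b + s) rest

-- the ideal flat output: per object, chunkOffs 0 of its chunk, advancing a Nat cursor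
def outChunks (sl : List Int) : List Int → Nat → List Int
  | [], _ => []
  | tc :: rest, k =>
      chunkOffs 0 ((sl.drop k).take tc.toNat) ++ outChunks sl rest (k + tc.toNat)

-- the bases vector: per object, its starting prefix value repeated tc times
def basesList (sl : List Int) : List Int → Nat → List Int
  | [], _ => []
  | tc :: rest, k =>
      List.replicate tc.toNat ((sl.take k).sum) ++ basesList sl rest (k + tc.toNat)

theorem innerA_rest (sl : List Int) : ∀ (c : Nat) (j m : Int) (offs : List Int) (b : Int),
    1 ≤ j → PySem.List.pyGet? offs (-1) = some b →
    (PySem.List.pyRange j (j + c) 1).foldl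
        (fun (st : List Int × Int) (targetIdx : Int) =>
          if targetIdx == 0 then (st.1 ++ [0], st.2 + 1)
          else (st.1 ++ [((PySem.List.pyGet? st.1 (-1)).getD 0)
                           + ((PySem.List.pyGet? sl (st.2 - 1)).getD 0)], st.2 + 1))
        (offs, m)
      = (offs ++ restA sl m c b, m + c) := by
  intro c
  induction c with
  | zero => intro j m offs b hj _; simp [PySem.List.pyRange_one_eq_nil, restA]
  | succ c ih =>
      intro j m offs b hj hb
      rw [PySem.List.pyRange_one_cons (by push_cast; omega)]
      simp only [List.foldl_cons, hb, Option.getD_some]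
      rw [if_neg (show ¬ ((j == 0) = true) by simp; omega)]
      rw [show j + ((c : Nat) + 1 : Nat) = (j + 1) + (c : Int) by push_cast; ring]
      rw [ih (j + 1) (m + 1) (offs ++ [b + (PySem.List.pyGet? sl (m - 1)).getD 0])
          (b + (PySem.List.pyGet? sl (m - 1)).getD 0) (by omega)
          (PySem.List.pyGet?_neg_one_append_singleton _ _)]
      simp only [restA, List.append_assoc, List.cons_append, List.nil_append, Prod.mk.injEq]
      exact ⟨trivial, by push_cast; ring⟩

theorem innerA_obj (sl : List Int) (c : Nat) (m : Int) (offs : List Int) :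
    (PySem.List.pyRange 0 c 1).foldl
        (fun (st : List Int × Int) (targetIdx : Int) =>
          if targetIdx == 0 then (st.1 ++ [0], st.2 + 1)
          else (st.1 ++ [((PySem.List.pyGet? st.1 (-1)).getD 0)
                           + ((PySem.List.pyGet? sl (st.2 - 1)).getD 0)], st.2 + 1))
        (offs, m)
      = (offs ++ objOffs sl m c, m + c) := by
  cases c with
  | zero => simp [PySem.List.pyRange_one_eq_nil, objOffs]
  | succ c =>
      rw [PySem.List.pyRange_one_cons (by push_cast; omega)]
      simp only [List.foldl_cons]
      rw [if_pos (by decide)]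
      rw [show (((c : Nat) + 1 : Nat) : Int) = (0 + 1) + (c : Int) by push_cast; ring]
      rw [innerA_rest sl c (0 + 1) (m + 1) (offs ++ [0]) 0 (by omega)
          (PySem.List.pyGet?_neg_one_append_singleton _ _)]
      simp only [objOffs, List.append_assoc, List.cons_append, List.nil_append, Prod.mk.injEq]
      exact ⟨trivial, by push_cast; ring⟩

theorem chunkOffs_eq_rest (sl : List Int) : ∀ (c k : Nat) (b : Int),
    k + c + 1 ≤ sl.length →
    chunkOffs b ((sl.drop k).take (c + 1)) = b :: restA sl ((k : Int) + 1) c b := by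
  intro c
  induction c with
  | zero =>
      intro k b h
      have hk : k < sl.length := by omega
      have : (sl.drop k).take 1 = [sl[k]] := by
        rw [List.take_one, List.head?_drop]
        simp [List.getElem?_eq_getElem hk]
      simp [this, chunkOffs, restA]
  | succ c ih =>
      intro k b h
      have hk : k < sl.length := by omega
      have hdrop : sl.drop k = sl[k] :: sl.drop (k + 1) := List.drop_eq_getElem_cons hk
      rw [hdrop]
      simp only [List.take_succ_cons, chunkOffs]
      rw [ih (k + 1) (b + sl[k]) (by omega)]
      have hget : (PySem.List.pyGet? sl ((k : Int) + 1 - 1)).getD 0 = sl[k] := by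
        rw [show (k : Int) + 1 - 1 = (k : Int) by ring, PySem.List.pyGet?_natCast]
        simp [List.getElem?_eq_getElem hk]
      simp only [restA, hget]
      rw [show (k : Int) + 1 + 1 = ((k + 1 : Nat) : Int) + 1 by push_cast; ring]

theorem chunkOffs_eq_obj (sl : List Int) (c k : Nat) (h : k + c ≤ sl.length) :
    chunkOffs 0 ((sl.drop k).take c) = objOffs sl (k : Int) c := by
  cases c with
  | zero => simp [chunkOffs, objOffs]
  | succ c =>
      rw [chunkOffs_eq_rest sl c k 0 (by omega)]
      simp [objOffs]

theorem sum_nonneg_int (ts : List Int) (h : ∀ t ∈ ts, 0 ≤ t) : 0 ≤ ts.sum := by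
  induction ts with
  | nil => simp
  | cons t rest ih =>
      simp only [List.sum_cons]
      have := h t (List.mem_cons_self)
      have := ih (fun x hx => h x (List.mem_cons_of_mem _ hx))
      omega

-- A's fold, started at layout cursor k, appends exactly outChunks sl ts k
theorem A_fold_eq (sl : List Int) : ∀ (ts : List Int) (k : Nat) (offs : List Int),
    (∀ t ∈ ts, 0 ≤ t) → (k : Int) + ts.sum ≤ (sl.length : Int) →
    ((ts.foldl
      (fun (st : List Int × Int) (tc : Int) =>
        (PySem.List.pyRange 0 tc 1).foldl
          (fun (st : List Int × Int) (targetIdx : Int) =>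
            if targetIdx == 0 then (st.1 ++ [0], st.2 + 1)
            else (st.1 ++ [((PySem.List.pyGet? st.1 (-1)).getD 0)
                             + ((PySem.List.pyGet? sl (st.2 - 1)).getD 0)], st.2 + 1))
          st)
      (offs, (k : Int)))).1
    = offs ++ outChunks sl ts k := by
  intro ts
  induction ts with
  | nil => intro k offs _ _; simp [outChunks]
  | cons t rest ih =>
      intro k offs hnn hle
      have ht : 0 ≤ t := hnn t List.mem_cons_self
      have hrest : 0 ≤ rest.sum := sum_nonneg_int rest (fun x hx => hnn x (List.mem_cons_of_mem _ hx))
      simp only [List.sum_cons] at hle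
      obtain ⟨c, hc⟩ : ∃ c : Nat, t = (c : Int) := ⟨t.toNat, (Int.toNat_of_nonneg ht).symm⟩
      subst hc
      have hkc : k + c ≤ sl.length := by omega
      simp only [List.foldl_cons]
      rw [show (c : Int) = ((c : Nat) : Int) from rfl]
      rw [innerA_obj sl c (k : Int) offs]
      rw [show (k : Int) + (c : Int) = ((k + c : Nat) : Int) by push_cast; ring]
      rw [ih (k + c) (offs ++ objOffs sl (↑k) c)
        (fun x hx => hnn x (List.mem_cons_of_mem _ hx)) (by push_cast; omega)]
      simp only [outChunks, Int.toNat_natCast, List.append_assoc]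
      rw [chunkOffs_eq_obj sl c k hkc]

-- B pass 1: the prefix fold builds `prefixes`
theorem prefix_fold_eq (sl : List Int) : ∀ (ps : List Int) (b : Int),
    sl.foldl (fun (p : List Int) (s : Int) => p ++ [((PySem.List.pyGet? p (-1)).getD 0) + s])
      (ps ++ [b])
    = ps ++ prefixes b sl := by
  induction sl with
  | nil => intro ps b; simp [prefixes]
  | cons s rest ih =>
      intro ps b
      simp only [List.foldl_cons, PySem.List.pyGet?_neg_one_append_singleton, Option.getD_some]
      rw [ih (ps ++ [b]) (b + s)]
      simp [prefixes]

-- indexing into prefixes: entry k is b + sum of the first k elements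
theorem prefixes_getElem? (m : List Int) : ∀ (k : Nat) (b : Int), k ≤ m.length →
    (prefixes b m)[k]? = some (b + (m.take k).sum) := by
  induction m with
  | nil =>
      intro k b h
      have hk : k = 0 := by simpa using h
      subst hk; simp [prefixes]
  | cons s rest ih =>
      intro k b h
      cases k with
      | zero => simp [prefixes]
      | succ k =>
          simp only [prefixes, List.getElem?_cons_succ, List.take_succ_cons, List.sum_cons]
          rw [ih k (b + s) (by simpa using h)]
          simp [add_assoc]

-- B pass 2: the bases fold builds basesList (cursor stays within the prefix list)
theorem bases_fold_eq (sl : List Int) : ∀ (ts : List Int) (k : Nat) (bs : List Int),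
    (∀ t ∈ ts, 0 ≤ t) → (k : Int) + ts.sum ≤ (sl.length : Int) →
    ((ts.foldl
      (fun (st : List Int × Int) (tc : Int) =>
        (st.1 ++ List.replicate tc.toNat ((PySem.List.pyGet? (prefixes 0 sl) st.2).getD 0),
         st.2 + tc))
      (bs, (k : Int)))).1
    = bs ++ basesList sl ts k := by
  intro ts
  induction ts with
  | nil => intro k bs _ _; simp [basesList]
  | cons t rest ih =>
      intro k bs hnn hle
      have ht : 0 ≤ t := hnn t List.mem_cons_self
      have hrest : 0 ≤ rest.sum := sum_nonneg_int rest (fun x hx => hnn x (List.mem_cons_of_mem _ hx))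
      simp only [List.sum_cons] at hle
      obtain ⟨c, hc⟩ : ∃ c : Nat, t = (c : Int) := ⟨t.toNat, (Int.toNat_of_nonneg ht).symm⟩
      subst hc
      have hget : (PySem.List.pyGet? (prefixes 0 sl) (k : Int)).getD 0 = (sl.take k).sum := by
        rw [PySem.List.pyGet?_natCast, prefixes_getElem? sl k 0 (by omega)]
        simp
      simp only [List.foldl_cons, hget]
      rw [show (k : Int) + (c : Int) = ((k + c : Nat) : Int) by push_cast; ring]
      rw [ih (k + c) _ (fun x hx => hnn x (List.mem_cons_of_mem _ hx)) (by push_cast; omega)]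
      simp [basesList, List.append_assoc]

-- splitting prefixes at position c
theorem prefixes_split (c : Nat) : ∀ (m : List Int) (b : Int), c ≤ m.length →
    prefixes b m = chunkOffs b (m.take c) ++ prefixes (b + (m.take c).sum) (m.drop c) := by
  induction c with
  | zero => intro m b _; simp [chunkOffs]
  | succ c ih =>
      intro m b h
      cases m with
      | nil => simp at h
      | cons s rest =>
          simp only [List.take_succ_cons, List.drop_succ_cons, chunkOffs, List.sum_cons,
            List.cons_append, prefixes]
          rw [ih rest (b + s) (by simpa using h)]
          ring_nf

theorem chunkOffs_length (b : Int) (m : List Int) : (chunkOffs b m).length = m.length := by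
  induction m generalizing b with
  | nil => rfl
  | cons s rest ih => simp [chunkOffs, ih]

theorem chunkOffs_map_sub (d : Int) (m : List Int) : ∀ b,
    (chunkOffs b m).map (fun x => x - d) = chunkOffs (b - d) m := by
  induction m with
  | nil => intro b; rfl
  | cons s rest ih => intro b; simp [chunkOffs, ih, sub_add_eq_add_sub]

theorem zip_replicate_map_sub (p : Int) : ∀ (xs : List Int),
    (xs.zip (List.replicate xs.length p)).map (fun pb : Int × Int => pb.1 - pb.2)
      = xs.map (fun x => x - p) := by
  intro xs
  induction xs with
  | nil => rfl
  | cons x rest ih => simp [List.replicate_succ, ih]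

-- B pass 3 after passes 1–2 equals the ideal output
theorem zip_sub_eq_outChunks (sl : List Int) : ∀ (ts : List Int) (k : Nat),
    (∀ t ∈ ts, 0 ≤ t) → (k : Int) + ts.sum ≤ (sl.length : Int) →
    ((prefixes ((sl.take k).sum) (sl.drop k)).zip (basesList sl ts k)).map
        (fun pb : Int × Int => pb.1 - pb.2)
      = outChunks sl ts k := by
  intro ts
  induction ts with
  | nil => intro k _ _; simp [basesList, outChunks]
  | cons t rest ih =>
      intro k hnn hle
      have ht : 0 ≤ t := hnn t List.mem_cons_self
      have hrest : 0 ≤ rest.sum := sum_nonneg_int rest (fun x hx => hnn x (List.mem_cons_of_mem _ hx))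
      simp only [List.sum_cons] at hle
      obtain ⟨c, hc⟩ : ∃ c : Nat, t = (c : Int) := ⟨t.toNat, (Int.toNat_of_nonneg ht).symm⟩
      subst hc
      have hkc : k + c ≤ sl.length := by omega
      have hclen : c ≤ (sl.drop k).length := by simp [List.length_drop]; omega
      have hchunklen : ((sl.drop k).take c).length = c := by
        simp [List.length_take]; omega
      simp only [basesList, outChunks, Int.toNat_natCast]
      rw [prefixes_split c (sl.drop k) ((sl.take k).sum) hclen]
      rw [List.zip_append (by rw [chunkOffs_length, hchunklen, List.length_replicate])]
      rw [List.map_append]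
      congr 1
      · rw [show List.replicate c ((sl.take k).sum)
              = List.replicate (chunkOffs ((sl.take k).sum) ((sl.drop k).take c)).length
                  ((sl.take k).sum) by rw [chunkOffs_length, hchunklen]]
        rw [zip_replicate_map_sub, chunkOffs_map_sub]
        simp
      · rw [List.drop_drop]
        have hsum : (sl.take k).sum + ((sl.drop k).take c).sum = (sl.take (c + k)).sum := by
          rw [show c + k = k + c by ring, List.take_add, List.sum_append]
        rw [hsum, show c + k = k + c by ring]
        exact ih (k + c) (fun x hx => hnn x (List.mem_cons_of_mem _ hx)) (by push_cast; omega)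

-- ===== VERDICT (by name: the statement is the Claim_ definition above) =====
theorem getOffsetFrom_spec : Claim_equal_getOffsetFrom := by
  intro ts sl _ hpre
  obtain ⟨hsum, hnn⟩ := hpre
  unfold Spec_getOffsetFrom getOffsetFrom getOffsetFrom_alt
  have hbound : ((0 : Nat) : Int) + ts.sum ≤ (sl.length : Int) := by
    simpa using le_of_eq hsum
  have hA := A_fold_eq sl ts 0 [] hnn hbound
  have hB := bases_fold_eq sl ts 0 [] hnn hbound
  have hZ := zip_sub_eq_outChunks sl ts 0 hnn hbound
  simp only [Nat.cast_zero, List.nil_append] at hA hB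
  simp only [List.take_zero, List.sum_nil, List.drop_zero] at hZ
  have hpref : sl.foldl
      (fun (p : List Int) (s : Int) => p ++ [((PySem.List.pyGet? p (-1)).getD 0) + s]) [0]
      = prefixes 0 sl := by
    simpa using prefix_fold_eq sl [] 0
  simp only [hA, hpref, hB, hZ]
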